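-- pv_equiv track=rewrite | github.com/ruben4181/ADA | Proyecto/Copia de binomial.py | klimit
-- ===== SOURCE A (Python) =====
-- import operator as op
-- from functools import reduce
--
-- def ncr(n, r):
--     r = min(r, n-r)
--     numer = reduce(op.mul, range(n, n-r, -1), 1)
--     denom = reduce(op.mul, range(1, r+1), 1)
--     return numer // denom
--
-- def klimit(n):
-- 	l=2
-- 	h=120
-- 	mid=(l+h)>>1
-- 	midt=mid>>1
-- 	ans=-1
-- 	oldAns=0
-- 	while l<h:
-- 		test=ncr(mid, midt)
-- 		if test>n:
-- 			h=mid
-- 		else: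
-- 			l=mid
-- 		mid=(l+h)>>1
-- 		midt=mid>>1
-- 		ans=midt
-- 		if ans==oldAns:
-- 			break
-- 		else:
-- 			oldAns=ans
-- 	return ans
-- ===== SOURCE B (Python) =====
-- def klimit(n):
--     best = 2
--     for m in range(2, 120):
--         c = 1
--         for i in range(m // 2):
--             c = c * (m - i) // (i + 1)
--         if c <= n:
--             best = m
--     return best // 2
-- ===== Notes on version B (the rewrite author's own statement) =====
-- stated objective: simpler
-- what changed: Replaced the binary search with its ans==oldAns early-break hack by a plain linear scan that keeps the largest m in range(2,120) whose central binomial coefficient is <= n and returns best//2.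
-- intended difference: On n in [10,20), [92378,184756), [1352078,2704156) and [20058300,40116600) A's ans==oldAns break stops the binary search one halving too early at an odd midpoint and A returns a value one too large (3,10,12,14), while B returns the intended largest m with C(m,m//2)<=n divided by 2 (2,9,11,13). — e.g. on klimit(10): A returns 3, B returns 2
import Mathlib
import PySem

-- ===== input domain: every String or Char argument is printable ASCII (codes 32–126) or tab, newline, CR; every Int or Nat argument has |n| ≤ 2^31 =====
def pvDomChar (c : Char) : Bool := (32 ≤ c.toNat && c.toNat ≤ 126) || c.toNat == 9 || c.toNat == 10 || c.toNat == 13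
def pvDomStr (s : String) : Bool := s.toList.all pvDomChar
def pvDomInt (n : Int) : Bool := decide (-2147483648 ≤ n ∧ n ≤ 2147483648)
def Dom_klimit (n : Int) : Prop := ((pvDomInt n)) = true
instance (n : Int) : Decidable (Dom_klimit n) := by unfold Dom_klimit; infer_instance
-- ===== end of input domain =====

-- B replaces A's binary search (whose ans==oldAns break exits one halving too early on four
-- intervals, see D_klimit) by a plain linear scan for the largest m in range(2,120) with
-- C(m, m//2) <= n, returning best//2; objective: simpler.


-- ===== PORT A =====
-- ncr(n, r): reduce(op.mul, range(n, n-r, -1), 1) // reduce(op.mul, range(1, r+1), 1)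
def ncrA (n r : Int) : Int :=
  let r := min r (n - r)
  let numer := (PySem.List.pyRange n (n - r) (-1)).foldl (· * ·) 1
  let denom := (PySem.List.pyRange 1 (r + 1) 1).foldl (· * ·) 1
  PySem.Int.floordiv numer denom

-- the while loop of A; the fuel argument only makes the recursion structural
-- (the loop runs far fewer than 100 iterations), it never changes the result
def loopA : Nat → Int → Int → Int → Int → Int → Int → Int → Int
  | 0, _, _, _, _, ans, _, _ => ans
  | Nat.succ fuel, l, h, mid, midt, ans, oldAns, n =>
    if l < h then
      let l' := if ncrA mid midt > n then l else mid
      let h' := if ncrA mid midt > n then mid else h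
      let mid' := PySem.Int.floordiv (l' + h') 2   -- (l+h)>>1
      let midt' := PySem.Int.floordiv mid' 2       -- mid>>1
      -- ans := midt'; "if ans==oldAns: break" returns ans, else oldAns := ans and loop
      if midt' = oldAns then midt'
      else loopA fuel l' h' mid' midt' midt' midt' n
    else ans

def klimit (n : Int) : Int :=
  let l : Int := 2
  let h : Int := 120
  let mid := PySem.Int.floordiv (l + h) 2
  let midt := PySem.Int.floordiv mid 2
  loopA 100 l h mid midt (-1) 0 n

-- ===== PORT B =====
-- inner loop of B: c = 1; for i in range(m//2): c = c*(m-i)//(i+1)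
def centralB (m : Int) : Int :=
  (PySem.List.pyRange 0 (PySem.Int.floordiv m 2) 1).foldl
    (fun c i => PySem.Int.floordiv (c * (m - i)) (i + 1)) 1

def klimit_alt (n : Int) : Int :=
  let best := (PySem.List.pyRange 2 120 1).foldl
    (fun best m => if centralB m ≤ n then m else best) 2
  PySem.Int.floordiv best 2

-- ===== PRECONDITION & SPEC =====
-- On these four intervals A's ans==oldAns break stops its binary search one halving too early at
-- an odd midpoint and A returns a value one too large (3, 10, 12, 14), while B returns the intended
-- largest m in range(2,120) with C(m,m//2) <= n, divided by 2 (2, 9, 11, 13).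
def D_klimit (n : Int) : Prop :=
  (10 ≤ n ∧ n < 20) ∨ (92378 ≤ n ∧ n < 184756) ∨
  (1352078 ≤ n ∧ n < 2704156) ∨ (20058300 ≤ n ∧ n < 40116600)
instance (n : Int) : Decidable (D_klimit n) := by unfold D_klimit; infer_instance

def Spec_klimit (n : Int) (out : Int) : Prop := ¬ D_klimit n → out = klimit_alt n
instance (n : Int) (out : Int) : Decidable (Spec_klimit n out) := by unfold Spec_klimit; infer_instance

def pvDiffWitness_klimit : Int := 10
def pvDiffWitnessOut_klimit : Int × Int := (3, 2)

-- ===== CLAIM (what is proved, stated in full; the proofs are below) =====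
def Claim_unchanged_klimit : Prop := ∀ (n : Int), Dom_klimit n → Spec_klimit n (klimit n)
def Claim_changed_klimit : Prop := Dom_klimit (pvDiffWitness_klimit) ∧ D_klimit (pvDiffWitness_klimit) ∧ klimit (pvDiffWitness_klimit) = pvDiffWitnessOut_klimit.1 ∧ klimit_alt (pvDiffWitness_klimit) = pvDiffWitnessOut_klimit.2 ∧ pvDiffWitnessOut_klimit.1 ≠ pvDiffWitnessOut_klimit.2
def Claim_exact_klimit : Prop := ∀ (n : Int), Dom_klimit n → D_klimit n → klimit n ≠ klimit_alt n

-- ===== LEMMAS AND PROOFS =====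

-- CN k = C(2+k, (2+k)//2): the finite family of constants both programs compare n against
def CN (k : Nat) : Int := centralB (2 + (k : Int))

-- loopA with its test "ncr(mid, midt) > n" replaced by the index test "c < mid";
-- on an interval CN (c-2) ≤ n < CN (c-1) the two tests agree (loopA_eq_loopS below)
def loopS : Nat → Int → Int → Int → Int → Int → Int → Int → Int
  | 0, _, _, _, _, ans, _, _ => ans
  | Nat.succ fuel, l, h, mid, midt, ans, oldAns, c =>
    if l < h then
      let l' := if c < mid then l else mid
      let h' := if c < mid then mid else h
      let mid' := PySem.Int.floordiv (l' + h') 2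
      let midt' := PySem.Int.floordiv mid' 2
      if midt' = oldAns then midt'
      else loopS fuel l' h' mid' midt' midt' midt' c
    else ans

-- the 118 values C(2+k, (2+k)//2), k = 0..117, as literals (checked below by decide):
-- each port's comparisons against n are reduced to comparisons of these constants
def CNlit : List Int := [2, 3, 6, 10, 20, 35, 70, 126, 252, 462, 924, 1716, 3432, 6435, 12870, 24310, 48620, 92378, 184756, 352716, 705432, 1352078, 2704156, 5200300, 10400600, 20058300, 40116600, 77558760, 155117520, 300540195, 601080390, 1166803110, 2333606220, 4537567650, 9075135300, 17672631900, 35345263800, 68923264410, 137846528820, 269128937220, 538257874440, 1052049481860, 2104098963720, 4116715363800, 8233430727600, 16123801841550, 32247603683100, 63205303218876, 126410606437752, 247959266474052, 495918532948104, 973469712824056, 1946939425648112, 3824345300380220, 7648690600760440, 15033633249770520, 30067266499541040, 59132290782430712, 118264581564861424, 232714176627630544, 465428353255261088, 916312070471295267, 1832624140942590534, 3609714217008132870, 7219428434016265740, 14226520737620288370, 28453041475240576740, 56093138908331422716, 112186277816662845432, 221256270138418389602, 442512540276836779204, 873065282167813104916, 1746130564335626209832, 3446310324346630677300, 6892620648693261354600,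 13608507434599516007800, 27217014869199032015600, 53753604366668088230810, 107507208733336176461620, 212392290424395860814420, 424784580848791721628840, 839455243105945545123660, 1678910486211891090247320, 3318776542511877736535400, 6637553085023755473070800, 13124252690842425594480900, 26248505381684851188961800, 51913710643776705684835560, 103827421287553411369671120, 205397724721029574666088520, 410795449442059149332177040, 812850570172585125274307760, 1625701140345170250548615520, 3217533506933149454210801550, 6435067013866298908421603100, 12738806129490428451365214300, 25477612258980856902730428600, 50445672272782096667406248628, 100891344545564193334812497256, 199804427433372226016001220056, 399608854866744452032002440112, 791532924062974587678774064068, 1583065848125949175357548128136, 3136262529306125724764953838760, 6272525058612251449529907677520, 12428892245768720464809261509160, 24857784491537440929618523018320, 49263609265046928387789436527216, 98527218530093856775578873054432, 195295022443578894680165266232892, 390590044887157789360330532465784, 774327632846470705223111406467256, 1548655265692941410446222812934512, 3070609578529107968988200404956360, 6141219157058215937976400809912720, 12178349853827309571919303301013360, 24356699707654619143838606602026720, 48307454420181661301946569760686328]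

set_option maxRecDepth 1000000 in
theorem CN_eq_lit : ∀ k : Nat, k < 118 → CN k = CNlit.getD k 0 := by decide
set_option maxRecDepth 1000000 in
theorem ncr_eq_lit : ∀ k : Nat, k < 118 →
    ncrA (2 + (k:Int)) (PySem.Int.floordiv (2 + (k:Int)) 2) = CNlit.getD k 0 := by decide
set_option maxRecDepth 100000 in
theorem lit_succ_lt : ∀ k : Nat, k < 117 → CNlit.getD k 0 < CNlit.getD (k+1) 0 := by decide

theorem ncr_eq_CN : ∀ k : Nat, k < 118 →
    ncrA (2 + (k:Int)) (PySem.Int.floordiv (2 + (k:Int)) 2) = CN k := by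
  intro k hk
  rw [ncr_eq_lit k hk, CN_eq_lit k hk]

theorem CN_succ_lt : ∀ k : Nat, k < 117 → CN k < CN (k+1) := by
  intro k hk
  rw [CN_eq_lit k (by omega), CN_eq_lit (k+1) (by omega)]
  exact lit_succ_lt k hk

theorem CN_zero : CN 0 = 2 := by rw [CN_eq_lit 0 (by omega)]; rfl

theorem CN_lits : CN 3 = 10 ∧ CN 4 = 20 ∧ CN 17 = 92378 ∧ CN 18 = 184756 ∧
    CN 21 = 1352078 ∧ CN 22 = 2704156 ∧ CN 25 = 20058300 ∧ CN 26 = 40116600 ∧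
    2147483648 < CN 32 := by
  rw [CN_eq_lit 3 (by omega), CN_eq_lit 4 (by omega), CN_eq_lit 17 (by omega),
      CN_eq_lit 18 (by omega), CN_eq_lit 21 (by omega), CN_eq_lit 22 (by omega),
      CN_eq_lit 25 (by omega), CN_eq_lit 26 (by omega), CN_eq_lit 32 (by omega)]
  decide
theorem loopS_vals : ∀ j : Nat, j < 32 →
    loopS 100 2 120 61 30 (-1) 0 ((j:Int)+2) =
      (if j = 3 ∨ j = 17 ∨ j = 21 ∨ j = 25
       then PySem.Int.floordiv ((j:Int)+2) 2 + 1
       else PySem.Int.floordiv ((j:Int)+2) 2) := by decide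
theorem loopS_low : loopS 100 2 120 61 30 (-1) 0 1 = 1 := by decide

theorem CN_mono : ∀ (a b : Nat), a ≤ b → b ≤ 117 → CN a ≤ CN b := by
  intro a b hab hb
  induction b with
  | zero => simp [Nat.le_zero.mp hab]
  | succ b ih =>
    rcases Nat.lt_or_ge a (b+1) with hlt | hge
    · exact le_trans (ih (by omega) (by omega)) (le_of_lt (CN_succ_lt b (by omega)))
    · have : a = b + 1 := by omega
      simp [this]

theorem intBall118 {P : Int → Prop} (h : ∀ k : Nat, k < 118 → P (2 + (k:Int))) :
    ∀ m : Int, 2 ≤ m → m ≤ 119 → P m := by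
  intro m h2 h119
  have hk : m = 2 + (((m - 2).toNat : Nat) : Int) := by omega
  rw [hk]
  exact h _ (by omega)

theorem loopA_eq_loopS (c : Int) :
    ∀ (fuel : Nat) (l h ans oldAns n : Int),
    (∀ m : Int, 2 ≤ m → m ≤ 119 → (ncrA m (PySem.Int.floordiv m 2) > n ↔ c < m)) →
    2 ≤ l → h ≤ 120 →
    ∀ mid midt, mid = PySem.Int.floordiv (l + h) 2 → midt = PySem.Int.floordiv mid 2 →
    loopA fuel l h mid midt ans oldAns n = loopS fuel l h mid midt ans oldAns c := by
  intro fuel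
  induction fuel with
  | zero => intro l h ans oldAns n H hl hh mid midt hm hmt; rfl
  | succ fuel ih =>
    intro l h ans oldAns n H hl hh mid midt hm hmt
    simp only [loopA, loopS]
    by_cases hlh : l < h
    · have hml : l ≤ mid ∧ mid ≤ h := by
        rw [hm]
        exact PySem.Int.floordiv_two_mid_bounds (le_of_lt hlh)
      have hm119 : mid ≤ 119 := by
        rw [hm, PySem.Int.floordiv_eq_ediv_of_pos (by norm_num)]
        omega
      have hm2 : 2 ≤ mid := by omega
      have hp : (ncrA mid midt > n) = (c < mid) := by
        rw [hmt]; exact propext (H mid hm2 hm119)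
      simp only [if_pos hlh, hp]
      by_cases hc : c < mid
      · simp only [if_pos hc]
        by_cases hb : PySem.Int.floordiv (PySem.Int.floordiv (l + mid) 2) 2 = oldAns
        · simp only [if_pos hb]
        · simp only [if_neg hb]
          exact ih l mid _ _ n H hl (by omega) _ _ rfl rfl
      · simp only [if_neg hc]
        by_cases hb : PySem.Int.floordiv (PySem.Int.floordiv (mid + h) 2) 2 = oldAns
        · simp only [if_pos hb]
        · simp only [if_neg hb]
          exact ih mid h _ _ n H hm2 hh _ _ rfl rfl
    · simp only [if_neg hlh]

-- B's fold with its test "centralB m <= n" replaced by the index test "m <= c"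
theorem foldlB_congr {p q : Int → Prop} [DecidablePred p] [DecidablePred q] :
    ∀ (L : List Int) (b : Int), (∀ m ∈ L, (p m ↔ q m)) →
    L.foldl (fun best m => if p m then m else best) b
      = L.foldl (fun best m => if q m then m else best) b := by
  intro L
  induction L with
  | nil => intro b H; rfl
  | cons x xs ih =>
    intro b H
    simp only [List.foldl_cons]
    have hx := H x (by simp)
    by_cases hc : p x
    · rw [if_pos hc, if_pos (hx.mp hc)]
      exact ih _ (fun m hm => H m (by simp [hm]))
    · rw [if_neg hc, if_neg (fun h' => hc (hx.mpr h'))]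
      exact ih _ (fun m hm => H m (by simp [hm]))

-- value of the index-test fold: it keeps the accumulator once all elements exceed c …
theorem foldS_stay (c : Int) : ∀ (N : Nat) (a b best : Int), (b - a).toNat = N → c < a →
    (PySem.List.pyRange a b 1).foldl (fun best m => if m ≤ c then m else best) best = best := by
  intro N
  induction N with
  | zero =>
    intro a b best hN hca
    rw [PySem.List.pyRange_one_eq_nil (by omega)]
    rfl
  | succ N ih =>
    intro a b best hN hca
    rw [PySem.List.pyRange_one_cons (by omega), List.foldl_cons, if_neg (by omega)]
    exact ih (a+1) b best (by omega) (by omega)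

-- … and returns c itself when the range starts at or below c and ends above it
theorem foldS_hit (c b : Int) (hcb : c < b) : ∀ (N : Nat) (a best : Int), (c - a).toNat = N →
    a ≤ c →
    (PySem.List.pyRange a b 1).foldl (fun best m => if m ≤ c then m else best) best = c := by
  intro N
  induction N with
  | zero =>
    intro a best hN hac
    have hac' : a = c := by omega
    rw [PySem.List.pyRange_one_cons (by omega), List.foldl_cons, if_pos (by omega), hac']
    exact foldS_stay c (b - (c+1)).toNat (c+1) b c rfl (by omega)
  | succ N ih =>
    intro a best hN hac
    rw [PySem.List.pyRange_one_cons (by omega), List.foldl_cons, if_pos (by omega)]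
    exact ih (a+1) a (by omega) (by omega)

-- B's result on the interval CN j ≤ n < CN (j+1)
theorem klimit_alt_val {j : Nat} (hj : j < 117) {n : Int}
    (h1 : CN j ≤ n) (h2 : n < CN (j+1)) :
    klimit_alt n = PySem.Int.floordiv ((j:Int) + 2) 2 := by
  show PySem.Int.floordiv _ 2 = _
  congr 1
  rw [foldlB_congr (q := fun m => m ≤ (j:Int) + 2)]
  · exact foldS_hit ((j:Int)+2) 120 (by omega) ((j:Int)+2-2).toNat 2 2 (by omega) (by omega)
  · intro m hm
    obtain ⟨hm2, hm120⟩ := PySem.List.mem_pyRange_one.mp hm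
    revert hm2 hm120
    refine fun hm2 hm120 => ?_
    have key : ∀ k : Nat, k < 118 → (centralB (2 + (k:Int)) ≤ n ↔ (2 + (k:Int)) ≤ (j:Int) + 2) := by
      intro k hk
      have hCN : centralB (2 + (k:Int)) = CN k := rfl
      rw [hCN]
      rcases Nat.lt_or_ge j k with hlt | hge
      · have hk1 : CN (j+1) ≤ CN k := CN_mono (j+1) k hlt (by omega)
        constructor <;> intro hc <;> omega
      · have hkj : CN k ≤ CN j := CN_mono k j hge (by omega)
        constructor <;> intro hc <;> omega
    exact intBall118 (P := fun m => (centralB m ≤ n ↔ m ≤ (j:Int) + 2)) key m hm2 (by omega)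

-- A's result on the interval CN j ≤ n < CN (j+1)
theorem klimit_val {j : Nat} (hj : j < 117) {n : Int}
    (h1 : CN j ≤ n) (h2 : n < CN (j+1)) :
    klimit n = loopS 100 2 120 61 30 (-1) 0 ((j:Int)+2) := by
  have HA : ∀ m : Int, 2 ≤ m → m ≤ 119 →
      (ncrA m (PySem.Int.floordiv m 2) > n ↔ (j:Int)+2 < m) := by
    have key : ∀ k : Nat, k < 118 →
        (ncrA (2 + (k:Int)) (PySem.Int.floordiv (2 + (k:Int)) 2) > n ↔ (j:Int)+2 < 2 + (k:Int)) := by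
      intro k hk
      rw [ncr_eq_CN k hk]
      rcases Nat.lt_or_ge j k with hlt | hge
      · have hk1 : CN (j+1) ≤ CN k := CN_mono (j+1) k hlt (by omega)
        constructor <;> intro hc <;> omega
      · have hkj : CN k ≤ CN j := CN_mono k j hge (by omega)
        constructor <;> intro hc <;> omega
    exact intBall118 key
  have := loopA_eq_loopS ((j:Int)+2) 100 2 120 (-1) 0 n HA (by norm_num) (by norm_num)
    (PySem.Int.floordiv (2 + 120) 2) (PySem.Int.floordiv (PySem.Int.floordiv (2 + 120) 2) 2) rfl rfl
  show loopA 100 2 120 (PySem.Int.floordiv (2 + 120) 2)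
      (PySem.Int.floordiv (PySem.Int.floordiv (2 + 120) 2) 2) (-1) 0 n = _
  rw [this]
  norm_num

-- below every CN value (n < 2) both programs behave as at n = "index 1"
theorem klimit_low {n : Int} (hn : n < 2) : klimit n = 1 ∧ klimit_alt n = 1 := by
  have hge : ∀ m : Int, 2 ≤ m → m ≤ 119 → 2 ≤ centralB m := by
    have key : ∀ k : Nat, k < 118 → 2 ≤ centralB (2 + (k:Int)) := by
      intro k hk
      have : CN 0 ≤ CN k := CN_mono 0 k (by omega) (by omega)
      rw [CN_zero] at this
      exact this
    exact intBall118 key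
  constructor
  · have HA : ∀ m : Int, 2 ≤ m → m ≤ 119 →
        (ncrA m (PySem.Int.floordiv m 2) > n ↔ (1:Int) < m) := by
      have key : ∀ k : Nat, k < 118 →
          (ncrA (2 + (k:Int)) (PySem.Int.floordiv (2 + (k:Int)) 2) > n ↔ (1:Int) < 2 + (k:Int)) := by
        intro k hk
        rw [ncr_eq_CN k hk]
        have h2 : 2 ≤ CN k := hge (2 + (k:Int)) (by omega) (by omega)
        constructor <;> intro hc <;> omega
      exact intBall118 key
    have := loopA_eq_loopS 1 100 2 120 (-1) 0 n HA (by norm_num) (by norm_num)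
      (PySem.Int.floordiv (2 + 120) 2) (PySem.Int.floordiv (PySem.Int.floordiv (2 + 120) 2) 2) rfl rfl
    show loopA 100 2 120 (PySem.Int.floordiv (2 + 120) 2)
        (PySem.Int.floordiv (PySem.Int.floordiv (2 + 120) 2) 2) (-1) 0 n = _
    rw [this]
    norm_num [loopS_low]
  · show PySem.Int.floordiv _ 2 = _
    rw [foldlB_congr (q := fun m => m ≤ (1:Int))]
    · rw [foldS_stay 1 118 2 120 2 (by decide) (by norm_num)]
      decide
    · intro m hm
      obtain ⟨hm2, hm120⟩ := PySem.List.mem_pyRange_one.mp hm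
      have := hge m hm2 (by omega)
      constructor <;> intro hc <;> omega

theorem find_interval : ∀ (J : Nat) (n : Int), CN 0 ≤ n → n < CN J →
    ∃ j, j < J ∧ CN j ≤ n ∧ n < CN (j+1) := by
  intro J
  induction J with
  | zero => intro n h1 h2; omega
  | succ J ih =>
    intro n h1 h2
    rcases lt_or_ge n (CN J) with hlt | hge
    · obtain ⟨j, hj, hj1, hj2⟩ := ih n h1 hlt
      exact ⟨j, by omega, hj1, hj2⟩
    · exact ⟨J, by omega, hge, h2⟩

-- any n in Dom with 2 ≤ n lies in some interval [CN j, CN (j+1)) with j < 32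
theorem locate {n : Int} (h2 : 2 ≤ n) (hhi : n ≤ 2147483648) :
    ∃ j, j < 32 ∧ CN j ≤ n ∧ n < CN (j+1) := by
  obtain ⟨_, _, _, _, _, _, _, _, c32⟩ := CN_lits
  exact find_interval 32 n (by rw [CN_zero]; omega) (by omega)

-- the four D_ intervals are exactly the intervals with index 3, 17, 21, 25
theorem D_index {n : Int} {j : Nat} (hj : j < 32) (h1 : CN j ≤ n) (h2 : n < CN (j+1)) :
    D_klimit n ↔ (j = 3 ∨ j = 17 ∨ j = 21 ∨ j = 25) := by
  obtain ⟨c3, c4, c17, c18, c21, c22, c25, c26, _⟩ := CN_lits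
  constructor
  · rintro (⟨ha, hb⟩ | ⟨ha, hb⟩ | ⟨ha, hb⟩ | ⟨ha, hb⟩)
    · left
      by_contra hne
      rcases Nat.lt_or_ge j 3 with hlt | hge
      · have := CN_mono (j+1) 3 (by omega) (by omega); omega
      · have : 3 < j := by omega
        have := CN_mono 4 j (by omega) (by omega); omega
    · right; left
      by_contra hne
      rcases Nat.lt_or_ge j 17 with hlt | hge
      · have := CN_mono (j+1) 17 (by omega) (by omega); omega
      · have : 17 < j := by omega
        have := CN_mono 18 j (by omega) (by omega); omega
    · right; right; left
      by_contra hne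
      rcases Nat.lt_or_ge j 21 with hlt | hge
      · have := CN_mono (j+1) 21 (by omega) (by omega); omega
      · have : 21 < j := by omega
        have := CN_mono 22 j (by omega) (by omega); omega
    · right; right; right
      by_contra hne
      rcases Nat.lt_or_ge j 25 with hlt | hge
      · have := CN_mono (j+1) 25 (by omega) (by omega); omega
      · have : 25 < j := by omega
        have := CN_mono 26 j (by omega) (by omega); omega
  · rintro (rfl | rfl | rfl | rfl)
    · exact Or.inl (by have h2' : n < CN 4 := h2; omega)
    · exact Or.inr (Or.inl (by have h2' : n < CN 18 := h2; omega))
    · exact Or.inr (Or.inr (Or.inl (by have h2' : n < CN 22 := h2; omega)))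
    · exact Or.inr (Or.inr (Or.inr (by have h2' : n < CN 26 := h2; omega)))

-- ===== VERDICT (by name: the statement is the Claim_ definition above) =====
theorem klimit_spec : Claim_unchanged_klimit := by
  intro n hdom hnd
  have hdom' : -2147483648 ≤ n ∧ n ≤ 2147483648 := by
    simpa [Dom_klimit, pvDomInt] using hdom
  show klimit n = klimit_alt n
  rcases lt_or_ge n 2 with hn2 | hn2
  · obtain ⟨e1, e2⟩ := klimit_low hn2
    rw [e1, e2]
  · obtain ⟨j, hj, hj1, hj2⟩ := locate hn2 hdom'.2
    have hnotd : ¬ (j = 3 ∨ j = 17 ∨ j = 21 ∨ j = 25) := fun h => hnd ((D_index hj hj1 hj2).mpr h)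
    rw [klimit_val (by omega) hj1 hj2, klimit_alt_val (by omega) hj1 hj2,
        loopS_vals j hj, if_neg hnotd]

theorem klimit_changed : Claim_changed_klimit := by
  unfold Claim_changed_klimit
  obtain ⟨c3, c4, _⟩ := CN_lits
  have h1 : CN 3 ≤ pvDiffWitness_klimit := by unfold pvDiffWitness_klimit; omega
  have h2 : pvDiffWitness_klimit < CN (3+1) := by
    have : CN (3+1) = CN 4 := rfl
    unfold pvDiffWitness_klimit; omega
  refine ⟨by decide, by decide, ?_, ?_, by decide⟩
  · rw [klimit_val (by omega) h1 h2, loopS_vals 3 (by omega)]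
    decide
  · rw [klimit_alt_val (by omega) h1 h2]
    decide

theorem klimit_tight : Claim_exact_klimit := by
  intro n hdom hd
  have hdom' : -2147483648 ≤ n ∧ n ≤ 2147483648 := by
    simpa [Dom_klimit, pvDomInt] using hdom
  have hn2 : 2 ≤ n := by
    rcases hd with ⟨ha, _⟩ | ⟨ha, _⟩ | ⟨ha, _⟩ | ⟨ha, _⟩ <;> omega
  obtain ⟨j, hj, hj1, hj2⟩ := locate hn2 hdom'.2
  have hdidx : j = 3 ∨ j = 17 ∨ j = 21 ∨ j = 25 := (D_index hj hj1 hj2).mp hd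
  rw [klimit_val (by omega) hj1 hj2, klimit_alt_val (by omega) hj1 hj2,
      loopS_vals j hj, if_pos hdidx]
  omega
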